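-- pv_equiv track=rewrite | github.com/paiml/depyler | examples/hard_wave3_037.py | first_mismatch_pos
-- ===== SOURCE A (Python) =====
-- from typing import Dict, List, Tuple
--
-- def first_mismatch_pos(s: str) -> int:
--     """Find position of first bracket mismatch, -1 if valid."""
--     stack: List[int] = []
--     positions: List[int] = []
--     i: int = 0
--     while i < len(s):
--         c: int = ord(s[i])
--         if c == ord("(") or c == ord("[") or c == ord("{"):
--             stack.append(c)
--             positions.append(i)
--         elif c == ord(")") or c == ord("]") or c == ord("}"):
--             if len(stack) == 0:
--                 return i
--             stack.pop()
--             positions.pop()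
--         i += 1
--     if len(positions) > 0:
--         return positions[0]
--     return -1
-- ===== SOURCE B (Python) =====
-- def first_mismatch_pos(s: str) -> int:
--     """Find position of first bracket mismatch, -1 if valid."""
--     depth = 0
--     start = -1
--     for i, ch in enumerate(s):
--         if ch in ")]}":
--             if depth == 0:
--                 return i
--             depth -= 1
--         elif ch in "([{":
--             if depth == 0:
--                 start = i
--             depth += 1
--     return start if depth > 0 else -1
-- ===== Notes on version B (the rewrite author's own statement) =====
-- stated objective: simpler
-- what changed: Replaces A's two parallel stacks (bracket codes and positions) with a single integer depth counter plus one remembered start index recorded at each 0->1 depth transition, which equals the bottom of A's surviving position stack.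
import Mathlib
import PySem

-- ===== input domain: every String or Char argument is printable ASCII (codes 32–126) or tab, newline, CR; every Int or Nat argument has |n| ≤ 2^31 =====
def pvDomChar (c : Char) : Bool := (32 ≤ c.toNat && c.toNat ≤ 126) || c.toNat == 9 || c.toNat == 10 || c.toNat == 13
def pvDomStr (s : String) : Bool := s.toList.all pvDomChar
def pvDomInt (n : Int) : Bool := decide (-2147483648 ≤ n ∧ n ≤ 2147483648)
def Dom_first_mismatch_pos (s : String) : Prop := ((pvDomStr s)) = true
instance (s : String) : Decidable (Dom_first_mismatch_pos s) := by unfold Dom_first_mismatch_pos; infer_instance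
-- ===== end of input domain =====

-- B replaces A's two parallel stacks by an integer depth counter and one start index (simpler, O(1) space).

-- ===== PORT A =====
-- A's while-loop: state is the char index i, the stack of bracket codes, and the parallel
-- stack of their positions; append/pop act at the list's end, exactly as in the Python.
def pvLoopA : List Char → Int → List Int → List Int → Int
  | [], _, _, positions =>
      match positions with
      | p :: _ => p          -- "if len(positions) > 0: return positions[0]"
      | [] => -1
  | ch :: rest, i, stack, positions =>
      let c : Int := (ch.toNat : Int)
      if c = 40 ∨ c = 91 ∨ c = 123 then       -- "(" "[" "{"
        pvLoopA rest (i + 1) (stack ++ [c]) (positions ++ [i])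
      else if c = 41 ∨ c = 93 ∨ c = 125 then  -- ")" "]" "}"
        if stack.length = 0 then i
        else pvLoopA rest (i + 1) stack.dropLast positions.dropLast
      else pvLoopA rest (i + 1) stack positions

def first_mismatch_pos (s : String) : Int :=
  pvLoopA s.toList 0 [] []

-- ===== PORT B =====
-- B's for-loop: state is depth and start; closers are tested first, as in Source B.
def pvLoopB : List Char → Int → Int → Int → Int
  | [], _, depth, start => if depth > 0 then start else -1
  | ch :: rest, i, depth, start =>
      if ch = ')' ∨ ch = ']' ∨ ch = '}' then
        if depth = 0 then i
        else pvLoopB rest (i + 1) (depth - 1) start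
      else if ch = '(' ∨ ch = '[' ∨ ch = '{' then
        pvLoopB rest (i + 1) (depth + 1) (if depth = 0 then i else start)
      else pvLoopB rest (i + 1) depth start

def first_mismatch_pos_alt (s : String) : Int :=
  pvLoopB s.toList 0 0 (-1)

-- ===== PRECONDITION & SPEC =====
def Spec_first_mismatch_pos (s : String) (out : Int) : Prop := out = first_mismatch_pos_alt s
instance (s : String) (out : Int) : Decidable (Spec_first_mismatch_pos s out) := by unfold Spec_first_mismatch_pos; infer_instance

-- ===== CLAIM (what is proved, stated in full; the proofs are below) =====
def Claim_equal_first_mismatch_pos : Prop := ∀ (s : String), Dom_first_mismatch_pos s → Spec_first_mismatch_pos s (first_mismatch_pos s)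

-- ===== LEMMAS AND PROOFS =====

theorem pvCharEq {a b : Char} (h : a.toNat = b.toNat) : a = b :=
  Char.ext (UInt32.toNat_inj.mp h)

-- Loop correspondence: B's depth is the length of A's stack, and whenever the position
-- stack is nonempty, B's start is its bottom element.
theorem pvLoop_eq : ∀ (cs : List Char) (i : Int) (stack positions : List Int) (start : Int),
    stack.length = positions.length →
    (∀ p t, positions = p :: t → start = p) →
    pvLoopA cs i stack positions = pvLoopB cs i (positions.length : Int) start := by
  intro cs
  induction cs with
  | nil =>
      intro i stack positions start hlen hhd
      cases positions with
      | nil => simp [pvLoopA, pvLoopB]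
      | cons p t =>
          simp [pvLoopA, pvLoopB, hhd p t rfl]
  | cons ch rest ih =>
      intro i stack positions start hlen hhd
      by_cases hop : (ch.toNat : Int) = 40 ∨ (ch.toNat : Int) = 91 ∨ (ch.toNat : Int) = 123
      · -- opener
        have hopB : (ch = '(' ∨ ch = '[' ∨ ch = '{') := by
          rcases hop with h | h | h
          · exact Or.inl (pvCharEq (by exact_mod_cast h))
          · exact Or.inr (Or.inl (pvCharEq (by exact_mod_cast h)))
          · exact Or.inr (Or.inr (pvCharEq (by exact_mod_cast h)))
        have hnotcl : ¬ (ch = ')' ∨ ch = ']' ∨ ch = '}') := by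
          rcases hopB with rfl | rfl | rfl <;> decide
        rw [pvLoopA, pvLoopB]
        simp only [hop, hnotcl, hopB, if_pos, if_false]
        have h1 : ((positions ++ [i]).length : Int) = (positions.length : Int) + 1 := by
          simp
        rw [show pvLoopB rest (i+1) ((positions.length : Int) + 1)
              (if (positions.length : Int) = 0 then i else start)
            = pvLoopB rest (i+1) (((positions ++ [i]).length : Int))
              (if (positions.length : Int) = 0 then i else start) by rw [h1]]
        refine ih (i+1) (stack ++ [(ch.toNat : Int)]) (positions ++ [i])
              (if (positions.length : Int) = 0 then i else start)
              (by simp [hlen]) ?_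
        intro p t hpt
        cases positions with
        | nil =>
            simp only [List.nil_append] at hpt
            cases hpt
            simp
        | cons q u =>
            have hq : q = p := by
              have := congrArg List.head? hpt
              simpa using this
            have hne : ¬ (((q :: u).length : Int) = 0) := by
              simp only [List.length_cons]; omega
            rw [if_neg hne]
            exact (hhd q u rfl).trans hq
      · by_cases hcl : (ch.toNat : Int) = 41 ∨ (ch.toNat : Int) = 93 ∨ (ch.toNat : Int) = 125
        · -- closer
          have hclB : (ch = ')' ∨ ch = ']' ∨ ch = '}') := by
            rcases hcl with h | h | h
            · exact Or.inl (pvCharEq (by exact_mod_cast h))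
            · exact Or.inr (Or.inl (pvCharEq (by exact_mod_cast h)))
            · exact Or.inr (Or.inr (pvCharEq (by exact_mod_cast h)))
          rw [pvLoopA, pvLoopB]
          simp only [hop, hcl, hclB, if_pos, if_false]
          cases positions with
          | nil =>
              have : stack.length = 0 := by simpa using hlen
              simp [this]
          | cons p t =>
              have hsl : ¬ (stack.length = 0) := by simp [hlen]
              have hne : ¬ (((p :: t).length : Int) = 0) := by
                simp only [List.length_cons]; omega
              rw [if_neg hsl, if_neg hne]
              have h1 : (((p :: t).dropLast).length : Int) = ((p :: t).length : Int) - 1 := by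
                simp
              rw [show pvLoopB rest (i+1) (((p :: t).length : Int) - 1) start
                  = pvLoopB rest (i+1) ((((p :: t).dropLast).length : Int)) start by rw [h1]]
              refine ih (i+1) stack.dropLast (p :: t).dropLast start ?_ ?_
              · simp [hlen]
              · intro q u hqu
                cases t with
                | nil => simp at hqu
                | cons r v =>
                    have hq : p = q := by
                      have := congrArg List.head? hqu
                      simpa [List.dropLast] using this
                    exact (hhd p (r :: v) rfl).trans hq
        · -- other char
          rw [pvLoopA, pvLoopB]
          have hclB : ¬ (ch = ')' ∨ ch = ']' ∨ ch = '}') := by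
            rintro (rfl | rfl | rfl) <;> simp at hcl
          have hopB : ¬ (ch = '(' ∨ ch = '[' ∨ ch = '{') := by
            rintro (rfl | rfl | rfl) <;> simp at hop
          simp only [hop, hcl, hclB, hopB, if_false]
          exact ih (i+1) stack positions start hlen hhd

-- ===== VERDICT (by name: the statement is the Claim_ definition above) =====
theorem first_mismatch_pos_spec : Claim_equal_first_mismatch_pos := by
  intro s _
  unfold Spec_first_mismatch_pos first_mismatch_pos first_mismatch_pos_alt
  exact pvLoop_eq s.toList 0 [] [] (-1) rfl (by intro p t h; cases h)
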